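-- pv_equiv track=rewrite | github.com/Kathelas007/ISJ | isj_proj3_xmusko00.py | first_odd_or_even
-- ===== SOURCE A (Python) =====
-- def first_odd_or_even(numbers):
--     """Returns 0 if there is the same number of even numbers and odd numbers
--        in the input list of ints, or there are only odd or only even numbers.
--        Returns the first odd number in the input list if the list has more even
--        numbers.
--        Returns the first even number in the input list if the list has more odd
--        numbers.
--
--     >>> first_odd_or_even([2,4,2,3,6])
--     3
--     >>> first_odd_or_even([3,5,4])
--     4
--     >>> first_odd_or_even([2,4,3,5])
--     0
--     >>> first_odd_or_even([2,4])
--     0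
--     >>> first_odd_or_even([3])
--     0
--     """
--     even_counter = 0
--     odd_counter = 0
--
--     for number in numbers:
--         if number % 2 == 0:
--             even_counter = even_counter +1
--         else:
--             odd_counter = odd_counter +1
--
--     if even_counter == odd_counter or even_counter == len(numbers) or odd_counter == len(numbers):
--         return 0
--
--     for number in numbers:
--         if (even_counter > odd_counter and number % 2 != 0) or (odd_counter > even_counter and number % 2 == 0):
--             return number
-- ===== SOURCE B (Python) =====
-- def first_odd_or_even(numbers):
--     evens, odds = [], []
--     for n in numbers:
--         (evens if n % 2 == 0 else odds).append(n)
--     if len(evens) == len(odds) or not evens or not odds: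
--         return 0
--     return odds[0] if len(evens) > len(odds) else evens[0]
-- ===== Notes on version B (the rewrite author's own statement) =====
-- stated objective: simpler
-- what changed: One pass partitions the numbers into evens and odds and the answer is read off the two lists' lengths and first elements, removing A's second scan of the input.
import Mathlib
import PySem

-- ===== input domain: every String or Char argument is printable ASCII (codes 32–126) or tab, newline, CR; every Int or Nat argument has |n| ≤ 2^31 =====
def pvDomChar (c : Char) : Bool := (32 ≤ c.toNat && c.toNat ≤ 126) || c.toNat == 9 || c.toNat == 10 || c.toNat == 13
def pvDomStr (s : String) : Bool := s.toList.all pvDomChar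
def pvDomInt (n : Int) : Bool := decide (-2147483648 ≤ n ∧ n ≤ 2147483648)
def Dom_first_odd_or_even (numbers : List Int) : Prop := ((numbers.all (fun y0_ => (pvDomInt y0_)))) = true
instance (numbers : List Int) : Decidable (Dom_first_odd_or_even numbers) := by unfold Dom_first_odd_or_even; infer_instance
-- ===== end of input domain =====

-- B partitions the numbers into evens and odds in one pass and reads the answer off the two lists, removing A's second scan; objective: simpler.


-- the parity test 'n % 2 == 0' both Pythons write (PySem.Int.mod is Python's %)
def pvIsEven (n : Int) : Bool := PySem.Int.mod n 2 == 0

-- ===== PORT A =====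
-- A's second loop: first number matching the majority test; the fall-through
-- (Python's implicit None) is unreachable under A's guard and is ported as 0.
def pvScanA (ec oc : Int) : List Int → Int
  | [] => 0
  | n :: rest =>
    if (ec > oc ∧ pvIsEven n = false) ∨ (oc > ec ∧ pvIsEven n = true) then n
    else pvScanA ec oc rest

def first_odd_or_even (numbers : List Int) : Int :=
  let counts := numbers.foldl
    (fun (p : Int × Int) n => if pvIsEven n then (p.1 + 1, p.2) else (p.1, p.2 + 1)) (0, 0)
  let ec := counts.1
  let oc := counts.2
  if ec = oc ∨ ec = (numbers.length : Int) ∨ oc = (numbers.length : Int) then 0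
  else pvScanA ec oc numbers

-- ===== PORT B =====
def first_odd_or_even_alt (numbers : List Int) : Int :=
  let p := numbers.partition pvIsEven
  let evens := p.1
  let odds := p.2
  if evens.length = odds.length ∨ evens = [] ∨ odds = [] then 0
  else if evens.length > odds.length then odds.headD 0 else evens.headD 0

-- ===== PRECONDITION & SPEC =====
def Spec_first_odd_or_even (numbers : List Int) (out : Int) : Prop := out = first_odd_or_even_alt numbers
instance (numbers : List Int) (out : Int) : Decidable (Spec_first_odd_or_even numbers out) := by unfold Spec_first_odd_or_even; infer_instance

-- ===== CLAIM (what is proved, stated in full; the proofs are below) =====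
def Claim_equal_first_odd_or_even : Prop := ∀ (numbers : List Int), Dom_first_odd_or_even numbers → Spec_first_odd_or_even numbers (first_odd_or_even numbers)

-- ===== LEMMAS AND PROOFS =====

-- A's counting fold computes the partition's filter-lengths, shifted by the accumulator
theorem pv_counts (xs : List Int) (a b : Int) :
    xs.foldl (fun (p : Int × Int) n =>
      if pvIsEven n then (p.1 + 1, p.2) else (p.1, p.2 + 1)) (a, b)
    = (a + ((xs.filter pvIsEven).length : Int),
       b + ((xs.filter (not ∘ pvIsEven)).length : Int)) := by
  induction xs generalizing a b with
  | nil => simp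
  | cons x xs ih =>
    by_cases h : pvIsEven x = true <;>
      simp only [List.foldl_cons, List.filter_cons, Function.comp_apply, h,
        Bool.not_true, Bool.not_false, if_true, if_false,
        Bool.false_eq_true, List.length_cons, ih] <;> push_cast <;> ring_nf

theorem pv_filter_len (xs : List Int) :
    (xs.filter pvIsEven).length + (xs.filter (not ∘ pvIsEven)).length = xs.length := by
  induction xs with
  | nil => rfl
  | cons x xs ih =>
    by_cases h : pvIsEven x = true <;>
      simp only [List.filter_cons, Function.comp_apply, h, Bool.not_true, Bool.not_false,
        ite_true, ite_false, Bool.false_eq_true, List.length_cons] <;> omega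

-- A's second scan returns the head of the minority filter
theorem pv_scan_gt (ec oc : Int) (h : ec > oc) (xs : List Int) :
    pvScanA ec oc xs = (xs.filter (not ∘ pvIsEven)).headD 0 := by
  induction xs with
  | nil => rfl
  | cons x xs ih =>
    by_cases hx : pvIsEven x = true
    · rw [pvScanA, if_neg, ih]
      · simp [hx]
      · rintro (⟨_, hc⟩ | ⟨hc, _⟩)
        · simp [hx] at hc
        · omega
    · rw [pvScanA, if_pos (Or.inl ⟨h, by simpa using hx⟩)]
      simp [hx]

theorem pv_scan_lt (ec oc : Int) (h : oc > ec) (xs : List Int) :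
    pvScanA ec oc xs = (xs.filter pvIsEven).headD 0 := by
  induction xs with
  | nil => rfl
  | cons x xs ih =>
    by_cases hx : pvIsEven x = true
    · rw [pvScanA, if_pos (Or.inr ⟨h, hx⟩)]
      simp [hx]
    · rw [pvScanA, if_neg, ih]
      · simp [hx]
      · rintro (⟨hc, _⟩ | ⟨_, hc⟩)
        · omega
        · exact hx hc

-- ===== VERDICT (by name: the statement is the Claim_ definition above) =====
theorem first_odd_or_even_spec : Claim_equal_first_odd_or_even := by
  intro numbers _
  unfold Spec_first_odd_or_even first_odd_or_even first_odd_or_even_alt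
  rw [List.partition_eq_filter_filter, pv_counts]
  simp only [Int.zero_add]
  set E := numbers.filter pvIsEven with hE
  set O := numbers.filter (not ∘ pvIsEven) with hO
  have hlen : E.length + O.length = numbers.length := pv_filter_len numbers
  have hE0 : E = [] ↔ E.length = 0 := List.length_eq_zero_iff.symm
  have hO0 : O = [] ↔ O.length = 0 := List.length_eq_zero_iff.symm
  by_cases hB : E.length = O.length ∨ E = [] ∨ O = []
  · have hA : (E.length : Int) = (O.length : Int) ∨ (E.length : Int) = (numbers.length : Int) ∨
        (O.length : Int) = (numbers.length : Int) := by
      rcases hB with h | h | h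
      · exact Or.inl (by exact_mod_cast h)
      · rw [hE0] at h
        exact Or.inr (Or.inr (by omega))
      · rw [hO0] at h
        exact Or.inr (Or.inl (by omega))
    rw [if_pos hA, if_pos hB]
  · push_neg at hB
    obtain ⟨hne, hEe, hOe⟩ := hB
    have hEn : E.length ≠ 0 := fun h => hEe (hE0.mpr h)
    have hOn : O.length ≠ 0 := fun h => hOe (hO0.mpr h)
    have hA : ¬ ((E.length : Int) = (O.length : Int) ∨ (E.length : Int) = (numbers.length : Int) ∨
        (O.length : Int) = (numbers.length : Int)) := by
      rintro (h | h | h)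
      · exact hne (by exact_mod_cast h)
      · have : E.length = numbers.length := by exact_mod_cast h
        omega
      · have : O.length = numbers.length := by exact_mod_cast h
        omega
    rw [if_neg hA, if_neg (by rintro (h | h | h) <;> [exact hne h; exact hEe h; exact hOe h])]
    by_cases hGT : E.length > O.length
    · rw [if_pos hGT, pv_scan_gt]
      exact_mod_cast hGT
    · rw [if_neg hGT, pv_scan_lt]
      have : O.length > E.length := by omega
      exact_mod_cast this
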